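-- pv_equiv track=rewrite | github.com/mandeukJeong/data-structure | hash/self_division.py | solution
-- ===== SOURCE A (Python) =====
-- from collections import Counter
--
-- def solution(nums):
--     answer = -1
--     minN = 1000001
--     cnt = Counter(nums)
--
--     for key in cnt:
--         if cnt[key] == key:
--             minN = min(minN, key)
--
--     if minN == 1000001:
--         return answer
--     else:
--         return minN
-- ===== SOURCE B (Python) =====
-- def solution(nums):
--     minN = 1000001
--     s = sorted(nums)
--     n = len(s)
--     i = 0
--     while i < n:
--         v = s[i]
--         j = i + 1
--         while j < n and s[j] == v:
--             j += 1
--         if j - i == v: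
--             minN = min(minN, v)
--         i = j
--     return -1 if minN == 1000001 else minN
-- ===== Notes on version B (the rewrite author's own statement) =====
-- stated objective: alternative
-- what changed: Replaced the Counter hash table and key loop by sorting a copy of nums and scanning it once, grouping consecutive equal values into runs and comparing each run length with its value.
import Mathlib
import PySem

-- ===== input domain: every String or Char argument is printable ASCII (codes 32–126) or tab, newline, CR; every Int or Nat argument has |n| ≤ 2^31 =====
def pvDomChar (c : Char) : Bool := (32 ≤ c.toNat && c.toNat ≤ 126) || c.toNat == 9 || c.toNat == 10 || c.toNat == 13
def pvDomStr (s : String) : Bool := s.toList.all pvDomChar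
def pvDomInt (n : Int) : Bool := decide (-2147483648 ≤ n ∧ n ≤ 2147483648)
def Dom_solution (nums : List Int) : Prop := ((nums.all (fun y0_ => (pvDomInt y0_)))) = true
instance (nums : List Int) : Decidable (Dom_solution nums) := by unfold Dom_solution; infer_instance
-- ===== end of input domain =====

-- B replaces A's Counter hash table by sort-then-scan over runs of equal values; alternative algorithm, same results.


-- ===== PORT A =====
-- Counter(nums); for key in cnt: if cnt[key] == key: minN = min(minN, key)
def solution (nums : List Int) : Int :=
  let answer : Int := -1
  let minN : Int := 1000001
  let cnt := PySem.Dict.counter nums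
  let minN := cnt.keys.foldl (fun m key => if cnt.getD key 0 = key then min m key else m) minN
  if minN = 1000001 then answer else minN

-- ===== PORT B =====
-- one pass over the sorted list: `rest` is the unprocessed suffix; a run of the head value
-- has length 1 + takeWhile, matching Source B's inner `while` counting equal neighbours
def solutionAltScan : List Int → Int → Int
  | [], minN => minN
  | v :: t, minN =>
      let run : Int := 1 + (t.takeWhile (fun x => x == v)).length
      let minN := if run = v then min minN v else minN
      solutionAltScan (t.dropWhile (fun x => x == v)) minN
termination_by l _ => l.length
decreasing_by
  simp only [List.length_cons]
  exact Nat.lt_succ_of_le (List.length_dropWhile_le _ _)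

def solution_alt (nums : List Int) : Int :=
  let minN := solutionAltScan (PySem.List.sorted nums (fun x => x) false) 1000001
  if minN = 1000001 then -1 else minN

-- ===== PRECONDITION & SPEC =====
def Spec_solution (nums : List Int) (out : Int) : Prop := out = solution_alt nums
instance (nums : List Int) (out : Int) : Decidable (Spec_solution nums out) := by unfold Spec_solution; infer_instance

-- ===== CLAIM (what is proved, stated in full; the proofs are below) =====
def Claim_equal_solution : Prop := ∀ (nums : List Int), Dom_solution nums → Spec_solution nums (solution nums)

-- ===== LEMMAS AND PROOFS =====

-- the candidates B's scan takes min over, by the same run recursion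
def runCands : List Int → List Int
  | [] => []
  | v :: t =>
      (if (1 + (t.takeWhile (fun x => x == v)).length : Int) = v then [v] else []) ++
        runCands (t.dropWhile (fun x => x == v))
termination_by l => l.length
decreasing_by
  simp only [List.length_cons]
  exact Nat.lt_succ_of_le (List.length_dropWhile_le _ _)

lemma scan_eq_foldl (l : List Int) (m : Int) :
    solutionAltScan l m = (runCands l).foldl min m := by
  induction l using runCands.induct generalizing m with
  | case1 => simp [solutionAltScan, runCands]
  | case2 v t ih =>
      rw [solutionAltScan, runCands]
      simp only [List.foldl_append]
      split_ifs with h <;> simp [ih]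

lemma foldl_min_le_init (l : List Int) (m : Int) : l.foldl min m ≤ m := by
  induction l generalizing m with
  | nil => simp
  | cons x t ih => exact le_trans (ih _) (min_le_left _ _)

lemma foldl_min_le_mem {l : List Int} {x : Int} (h : x ∈ l) (m : Int) :
    l.foldl min m ≤ x := by
  induction l generalizing m with
  | nil => cases h
  | cons y t ih =>
      rcases List.mem_cons.mp h with rfl | h'
      · simp only [List.foldl_cons]
        exact le_trans (foldl_min_le_init _ _) (min_le_right _ _)
      · exact ih h' _

lemma foldl_min_cases (l : List Int) (m : Int) :
    l.foldl min m = m ∨ l.foldl min m ∈ l := by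
  induction l generalizing m with
  | nil => simp
  | cons y t ih =>
      rcases ih (min m y) with h | h
      · rcases le_total m y with hle | hle
        · left; simpa [min_eq_left hle] using h
        · right
          rw [List.foldl_cons, h, min_eq_right hle]
          exact List.mem_cons_self
      · right; exact .tail _ h

lemma foldl_min_congr {l₁ l₂ : List Int} (h : ∀ x, x ∈ l₁ ↔ x ∈ l₂) (m : Int) :
    l₁.foldl min m = l₂.foldl min m := by
  apply le_antisymm
  · rcases foldl_min_cases l₂ m with h2 | h2
    · rw [h2]; exact foldl_min_le_init _ _
    · exact foldl_min_le_mem ((h _).mpr h2) _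
  · rcases foldl_min_cases l₁ m with h1 | h1
    · rw [h1]; exact foldl_min_le_init _ _
    · exact foldl_min_le_mem ((h _).mp h1) _

lemma mem_runCands {l : List Int} (hs : l.Pairwise (· ≤ ·)) (x : Int) :
    x ∈ runCands l ↔ x ∈ l ∧ (l.count x : Int) = x := by
  induction l using runCands.induct with
  | case1 => simp [runCands]
  | case2 v t ih =>
      set a := t.takeWhile (fun x => x == v) with ha
      set b := t.dropWhile (fun x => x == v) with hb
      have htab : t = a ++ b := (List.takeWhile_append_dropWhile).symm
      have hva : ∀ y ∈ a, y = v := by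
        intro y hy
        simpa using List.mem_takeWhile_imp hy
      have hvle : ∀ y ∈ t, v ≤ y := by
        intro y hy; exact (List.pairwise_cons.mp hs).1 y hy
      have hbs : b.Pairwise (· ≤ ·) := by
        have : t.Pairwise (· ≤ ·) := (List.pairwise_cons.mp hs).2
        exact List.Pairwise.sublist (List.dropWhile_sublist _) this
      have hvnb : v ∉ b := by
        intro hvb
        cases hbcons : b with
        | nil => simp [hbcons] at hvb
        | cons b0 bt =>
            have hb0ne : ¬ (b0 == v) = true := by
              have := List.head?_dropWhile_not (fun x => x == v) t
              rw [← hb, hbcons] at this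
              simpa using this
            have hb0v : b0 ≠ v := by simpa using hb0ne
            rw [hbcons] at hvb
            rcases List.mem_cons.mp hvb with rfl | hvbt
            · exact hb0v rfl
            · -- b0 ≤ v (pairwise in b) and v ≤ b0 (v ≤ all of t) force b0 = v
              have h1 : b0 ≤ v := by
                have := (List.pairwise_cons.mp (hbcons ▸ hbs)).1
                exact this v hvbt
              have h2 : v ≤ b0 := by
                apply hvle
                rw [htab, hbcons]; exact List.mem_append_right _ (.head _)
              exact hb0v (le_antisymm h1 h2)
      have hcounta : a.count v = a.length := by
        rw [List.count_eq_length]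
        intro y hy; exact ((hva y hy) ▸ rfl)
      have hcountv : (v :: t).count v = 1 + a.length := by
        rw [htab]
        simp [List.count_append, hcounta,
          List.count_eq_zero.mpr hvnb]
        omega
      have hcount_b : ∀ y, y ≠ v → (v :: t).count y = b.count y := by
        intro y hyv
        rw [htab]
        have hya : a.count y = 0 := by
          rw [List.count_eq_zero]
          intro hy; exact hyv (hva y hy)
        simp [List.count_append, hya, Ne.symm hyv]
      rw [runCands]
      constructor
      · intro hx
        rcases List.mem_append.mp hx with hx1 | hx2
        · split_ifs at hx1 with hrun
          · rcases List.mem_singleton.mp hx1 with rfl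
            refine ⟨.head _, ?_⟩
            rw [hcountv]; push_cast; omega
          · cases hx1
        · have := (ih hbs).mp hx2
          have hxv : x ≠ v := fun h => hvnb (h ▸ this.1)
          refine ⟨?_, ?_⟩
          · rw [List.mem_cons, htab]; right; exact List.mem_append_right _ this.1
          · rw [hcount_b x hxv]; exact this.2
      · rintro ⟨hxl, hxc⟩
        by_cases hxv : x = v
        · subst hxv
          apply List.mem_append_left
          have h2 : (1 + ((t.takeWhile (fun y => y == x)).length : Int)) = x := by
            rw [← ha]
            rw [hcountv] at hxc
            push_cast at hxc ⊢; omega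
          simp [h2]
        · apply List.mem_append_right
          refine (ih hbs).mpr ⟨?_, ?_⟩
          · rcases List.mem_cons.mp hxl with rfl | hxt
            · exact absurd rfl hxv
            · rw [htab] at hxt
              rcases List.mem_append.mp hxt with hxa | hxb
              · exact absurd (hva x hxa) hxv
              · exact hxb
          · rw [← hcount_b x hxv]; exact hxc

lemma foldl_if_eq_filter (p : Int → Prop) [DecidablePred p] (l : List Int) (m : Int) :
    l.foldl (fun m k => if p k then min m k else m) m
      = (l.filter (fun k => decide (p k))).foldl min m := by
  induction l generalizing m with
  | nil => rfl
  | cons x t ih =>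
      simp only [List.foldl_cons, List.filter_cons]
      by_cases h : p x <;> simp [h, ih]

lemma candA_mem (nums : List Int) (x : Int) :
    x ∈ (PySem.List.dedup nums).filter
        (fun k => decide ((PySem.Dict.counter nums).getD k 0 = k))
      ↔ x ∈ nums ∧ (nums.count x : Int) = x := by
  simp [List.mem_filter, PySem.Dict.getD_counter]

lemma candB_mem (nums : List Int) (x : Int) :
    x ∈ runCands (PySem.List.sorted nums (fun x => x) false)
      ↔ x ∈ nums ∧ (nums.count x : Int) = x := by
  rw [mem_runCands (by simpa using PySem.List.sorted_pairwise nums (fun x => x))]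
  rw [PySem.List.mem_sorted, (PySem.List.sorted_perm nums (fun x => x) false).count_eq]

-- ===== VERDICT (by name: the statement is the Claim_ definition above) =====
theorem solution_spec : Claim_equal_solution := by
  intro nums _
  show solution nums = solution_alt nums
  simp only [solution, solution_alt]
  rw [scan_eq_foldl]
  have hk : (PySem.Dict.counter nums).keys = PySem.List.dedup nums := by
    simp [PySem.Dict.keys_counter]
  rw [hk, foldl_if_eq_filter (fun k => (PySem.Dict.counter nums).getD k 0 = k)]
  rw [foldl_min_congr (fun x => (candA_mem nums x).trans (candB_mem nums x).symm)]
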